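-- pv_equiv track=rewrite | github.com/Arthur3409404/RaidBot | Raid_Bot.py | group_params
-- ===== SOURCE A (Python) =====
-- from collections import defaultdict
--
-- def group_params(params: dict, min_shared_keys: int = 3):
--     """
--     Groups params by common prefixes.
--     Everything not belonging to a detected group goes into 'mainframe'.
--     """
--
--     # Step 1: find all possible prefixes
--     prefix_counts = defaultdict(int)
--
--     for key in params.keys():
--         parts = key.split("_")
--         for i in range(1, len(parts)):
--             prefix = "_".join(parts[:i]) + "_"
--             prefix_counts[prefix] += 1
--
--     # Step 2: keep only prefixes with enough shared keys
--     valid_prefixes = {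
--         p for p, count in prefix_counts.items()
--         if count >= min_shared_keys
--     }
--
--     # Step 3: prefer the longest matching prefix (avoid overlaps)
--     valid_prefixes = sorted(valid_prefixes, key=len, reverse=True)
--
--     grouped = {"mainframe": {}}
--
--     for key, value in params.items():
--         matched = False
--
--         for prefix in valid_prefixes:
--             if key.startswith(prefix):
--                 group_name = prefix.rstrip("_")
--                 stripped_key = key[len(prefix):]
--
--                 grouped.setdefault(group_name, {})
--                 grouped[group_name][stripped_key] = value
--                 matched = True
--                 break
--
--         if not matched:
--             grouped["mainframe"][key] = value
--
--     return grouped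
-- ===== SOURCE B (Python) =====
-- def group_params(params: dict, min_shared_keys: int = 3):
--     """
--     Groups params by common prefixes (everything else -> 'mainframe').
--     One counting pass over each key's own prefixes, then per key a scan of
--     its own prefixes from longest to shortest: no global sorted prefix list,
--     no startswith scan over it.
--     """
--     counts = {}
--     for key in params:
--         parts = key.split("_")
--         acc = ""
--         for part in parts[:-1]:
--             acc = acc + part + "_"
--             counts[acc] = counts.get(acc, 0) + 1
--
--     grouped = {"mainframe": {}}
--     for key, value in params.items():
--         parts = key.split("_")
--         prefixes = []
--         acc = ""
--         for part in parts[:-1]: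
--             acc = acc + part + "_"
--             prefixes.append(acc)
--         chosen = None
--         for p in reversed(prefixes):
--             if counts.get(p, 0) >= min_shared_keys:
--                 chosen = p
--                 break
--         if chosen is None:
--             grouped["mainframe"][key] = value
--         else:
--             group_name = chosen.rstrip("_")
--             grouped.setdefault(group_name, {})
--             grouped[group_name][key[len(chosen):]] = value
--     return grouped
-- ===== Notes on version B (the rewrite author's own statement) =====
-- stated objective: alternative
-- what changed: Instead of building the global set of valid prefixes, sorting it by length and scanning it with startswith for every key, B builds the prefix counter with a running accumulator and, for each key, scans only that key's own underscore-prefixes from longest to shortest, taking the first one whose count reaches min_shared_keys.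
import Mathlib
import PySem

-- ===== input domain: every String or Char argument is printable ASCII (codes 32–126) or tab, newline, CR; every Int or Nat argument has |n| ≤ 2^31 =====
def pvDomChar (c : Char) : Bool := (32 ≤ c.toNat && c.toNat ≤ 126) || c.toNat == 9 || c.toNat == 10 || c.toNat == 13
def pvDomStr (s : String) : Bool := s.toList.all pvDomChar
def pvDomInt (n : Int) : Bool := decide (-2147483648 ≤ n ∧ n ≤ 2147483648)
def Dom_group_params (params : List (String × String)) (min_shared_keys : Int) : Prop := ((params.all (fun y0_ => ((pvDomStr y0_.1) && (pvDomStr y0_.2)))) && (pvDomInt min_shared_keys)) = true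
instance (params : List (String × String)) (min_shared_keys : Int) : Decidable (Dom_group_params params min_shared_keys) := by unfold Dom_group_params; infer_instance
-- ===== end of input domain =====

-- B replaces A's global sorted valid-prefix list (scanned with startswith per key) by a
-- per-key scan of the key's own underscore-prefixes from longest to shortest (alternative
-- decomposition, same results).

-- shared primitive helper: exact port of str.rstrip("_") (PySem has no rstrip-with-chars)
def pvRstripU (s : String) : String :=
  String.ofList ((s.toList.reverse.dropWhile (fun c => c == '_')).reverse)

-- ===== PORT A =====
def group_params (params : List (String × String)) (min_shared_keys : Int) : List (String × List (String × String)) :=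
  -- Step 1: find all possible prefixes
  let prefix_counts : PySem.Dict String Int :=
    params.foldl (fun d kv =>
      let parts := PySem.Chars.splitOn kv.1.toList ['_']
      (PySem.List.pyRange 1 (PySem.List.len parts) 1).foldl (fun d i =>
        let pre := String.ofList (PySem.Chars.join ['_'] (PySem.List.slice parts none (some i)) ++ ['_'])
        d.modify pre 0 (· + 1)) d) PySem.Dict.empty
  -- Step 2: keep only prefixes with enough shared keys
  let valid_prefixes : PySem.Set String :=
    PySem.Set.ofList ((prefix_counts.items.filter (fun pc => decide (min_shared_keys ≤ pc.2))).map (·.1))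
  -- Step 3: prefer the longest matching prefix
  let valid_sorted := PySem.List.sorted valid_prefixes (fun p => PySem.Str.len p) true
  let grouped : PySem.Dict String (PySem.Dict String String) :=
    params.foldl (fun grouped kv =>
      match valid_sorted.find? (fun pre => PySem.Str.startswith kv.1 pre) with
      | some pre =>
        let group_name := pvRstripU pre
        let stripped := PySem.Str.slice kv.1 (some (PySem.Str.len pre)) none
        let g1 := grouped.setdefault group_name PySem.Dict.empty
        g1.modify group_name PySem.Dict.empty (fun sub => sub.insert stripped kv.2)
      | none => grouped.modify "mainframe" PySem.Dict.empty (fun sub => sub.insert kv.1 kv.2))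
      ((PySem.Dict.empty : PySem.Dict String (PySem.Dict String String)).insert "mainframe" PySem.Dict.empty)
  grouped.items.map (fun g => (g.1, g.2.items))

-- ===== PORT B =====
def group_params_alt (params : List (String × String)) (min_shared_keys : Int) : List (String × List (String × String)) :=
  let counts : PySem.Dict String Int :=
    params.foldl (fun d kv =>
      let parts := PySem.Chars.splitOn kv.1.toList ['_']
      ((PySem.List.slice parts none (some (-1))).foldl
        (fun (st : List Char × PySem.Dict String Int) part =>
          let acc := st.1 ++ part ++ ['_']
          (acc, st.2.modify (String.ofList acc) 0 (· + 1))) ([], d)).2) PySem.Dict.empty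
  let grouped : PySem.Dict String (PySem.Dict String String) :=
    params.foldl (fun grouped kv =>
      let parts := PySem.Chars.splitOn kv.1.toList ['_']
      let prefixes := ((PySem.List.slice parts none (some (-1))).foldl
        (fun (st : List Char × List String) part =>
          let acc := st.1 ++ part ++ ['_']
          (acc, st.2 ++ [String.ofList acc])) ([], [])).2
      match prefixes.reverse.find? (fun p => decide (min_shared_keys ≤ counts.getD p 0)) with
      | some chosen =>
        let group_name := pvRstripU chosen
        let g1 := grouped.setdefault group_name PySem.Dict.empty
        g1.modify group_name PySem.Dict.empty (fun sub => sub.insert (PySem.Str.slice kv.1 (some (PySem.Str.len chosen)) none) kv.2)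
      | none => grouped.modify "mainframe" PySem.Dict.empty (fun sub => sub.insert kv.1 kv.2))
      ((PySem.Dict.empty : PySem.Dict String (PySem.Dict String String)).insert "mainframe" PySem.Dict.empty)
  grouped.items.map (fun g => (g.1, g.2.items))

-- ===== PRECONDITION & SPEC =====
def Spec_group_params (params : List (String × String)) (min_shared_keys : Int) (out : List (String × List (String × String))) : Prop := out = group_params_alt params min_shared_keys
instance (params : List (String × String)) (min_shared_keys : Int) (out : List (String × List (String × String))) : Decidable (Spec_group_params params min_shared_keys out) := by unfold Spec_group_params; infer_instance

-- ===== CLAIM (what is proved, stated in full; the proofs are below) =====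
def Claim_equal_group_params : Prop := ∀ (params : List (String × String)) (min_shared_keys : Int), Dom_group_params params min_shared_keys → Spec_group_params params min_shared_keys (group_params params min_shared_keys)

-- ===== LEMMAS AND PROOFS =====

-- reference split: pvSplit s pre l splits pre ++ l at the character s
def pvSplit (s : Char) : List Char → List Char → List (List Char)
  | pre, [] => [pre]
  | pre, c :: rest => if c = s then pre :: pvSplit s [] rest else pvSplit s (pre ++ [c]) rest

theorem pvGoEq (s : Char) (fuel : Nat) : ∀ (l cur : List Char) (acc : List (List Char)),
    l.length ≤ fuel →
    PySem.Chars.splitOn.go [s] fuel l cur acc = acc.reverse ++ pvSplit s cur.reverse l := by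
  induction fuel with
  | zero =>
    intro l cur acc h
    have hl : l = [] := List.eq_nil_of_length_eq_zero (Nat.le_zero.mp h)
    subst hl
    simp [PySem.Chars.splitOn.go, pvSplit]
  | succ fuel ih =>
    intro l cur acc h
    cases l with
    | nil => simp [PySem.Chars.splitOn.go, pvSplit]
    | cons c rest =>
      by_cases hc : c = s
      · subst hc
        have : [c].isPrefixOf (c :: rest) = true := by simp [List.isPrefixOf]
        simp only [PySem.Chars.splitOn.go, this]
        rw [show List.drop [c].length (c :: rest) = rest from rfl]
        rw [ih rest [] (cur.reverse :: acc) (by simpa using Nat.le_of_succ_le_succ h)]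
        simp [pvSplit]
      · have : [s].isPrefixOf (c :: rest) = false := by
          simp [List.isPrefixOf]; exact fun hh => (hc hh.symm).elim
        simp only [PySem.Chars.splitOn.go, this]
        rw [if_neg (by simp)]
        rw [ih rest (c :: cur) acc (by simpa using Nat.le_of_succ_le_succ h)]
        simp [pvSplit, hc]

theorem pvSplitOn_eq (s : Char) (cs : List Char) :
    PySem.Chars.splitOn cs [s] = pvSplit s [] cs := by
  unfold PySem.Chars.splitOn
  rw [pvGoEq s (cs.length + 1) cs [] [] (Nat.le_succ _)]
  simp

theorem pvSplit_ne_nil (s : Char) : ∀ (l pre : List Char), pvSplit s pre l ≠ [] := by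
  intro l
  induction l with
  | nil => intro pre; simp [pvSplit]
  | cons c rest ih =>
    intro pre
    by_cases hc : c = s
    · simp [pvSplit, hc]
    · simp [pvSplit, hc]; exact ih _

theorem pvJoin_pvSplit (s : Char) : ∀ (l pre : List Char),
    PySem.Chars.join [s] (pvSplit s pre l) = pre ++ l := by
  intro l
  induction l with
  | nil => intro pre; simp [pvSplit, PySem.Chars.join, List.intercalate]
  | cons c rest ih =>
    intro pre
    by_cases hc : c = s
    · subst hc
      rw [show pvSplit c pre (c :: rest) = pre :: pvSplit c [] rest by simp [pvSplit]]
      obtain ⟨hd, tl, hh⟩ : ∃ hd tl, pvSplit c [] rest = hd :: tl := by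
        cases hs : pvSplit c [] rest with
        | nil => exact absurd hs (pvSplit_ne_nil c rest [])
        | cons hd tl => exact ⟨hd, tl, rfl⟩
      have h2 := ih ([] : List Char)
      rw [hh] at h2 ⊢
      rw [PySem.Chars.join_cons_cons]
      simp only [List.nil_append] at h2
      simp [h2]
    · rw [show pvSplit s pre (c :: rest) = pvSplit s (pre ++ [c]) rest by simp [pvSplit, hc]]
      rw [ih (pre ++ [c])]
      simp

theorem pvSplit_no_sep (s : Char) : ∀ (l pre : List Char), s ∉ pre →
    ∀ p ∈ pvSplit s pre l, s ∉ p := by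
  intro l
  induction l with
  | nil =>
    intro pre hp p hmem
    simp only [pvSplit, List.mem_singleton] at hmem
    subst hmem; exact hp
  | cons c rest ih =>
    intro pre hp p hmem
    by_cases hc : c = s
    · subst hc
      rw [show pvSplit c pre (c :: rest) = pre :: pvSplit c [] rest by simp [pvSplit]] at hmem
      rcases List.mem_cons.mp hmem with h | h
      · subst h; exact hp
      · exact ih [] (by simp) p h
    · rw [show pvSplit s pre (c :: rest) = pvSplit s (pre ++ [c]) rest by simp [pvSplit, hc]] at hmem
      refine ih (pre ++ [c]) ?_ p hmem
      intro hmem2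
      rcases List.mem_append.mp hmem2 with h2 | h2
      · exact hp h2
      · exact hc (List.mem_singleton.mp h2).symm

-- reference prefixes: pvPfx a parts = the running a++part++'_' accumulations
def pvPfx : List Char → List (List Char) → List (List Char)
  | _, [] => []
  | a, part :: rest => (a ++ part ++ ['_']) :: pvPfx (a ++ part ++ ['_']) rest

theorem pvPfx_shift (a : List Char) : ∀ (l : List (List Char)) (b : List Char),
    pvPfx (a ++ b) l = (pvPfx b l).map (a ++ ·) := by
  intro l
  induction l with
  | nil => intro b; simp [pvPfx]
  | cons p rest ih =>
    intro b
    simp only [pvPfx, List.map_cons, List.append_assoc]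
    congr 1
    simpa [List.append_assoc] using ih (b ++ (p ++ ['_']))

theorem pvPfx_take : ∀ (l : List (List Char)) (a : List Char),
    pvPfx a l = (List.range l.length).map
      (fun j => a ++ PySem.Chars.join ['_'] (l.take (j+1)) ++ ['_']) := by
  intro l
  induction l with
  | nil => intro a; simp [pvPfx]
  | cons p rest ih =>
    intro a
    rw [show (p :: rest).length = rest.length + 1 from rfl, List.range_succ_eq_map]
    simp only [pvPfx, List.map_cons, List.map_map]
    congr 1
    · simp [PySem.Chars.join, List.intercalate]
    · rw [ih (a ++ p ++ ['_'])]
      apply List.map_congr_left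
      intro j hj
      simp only [Function.comp_apply, List.mem_range] at hj ⊢
      have htake : (p :: rest).take (j.succ + 1) = p :: rest.take (j + 1) := rfl
      rw [htake]
      obtain ⟨hd, tl, hh⟩ : ∃ hd tl, rest.take (j+1) = hd :: tl := by
        cases ht : rest.take (j+1) with
        | nil =>
          exfalso
          have := congrArg List.length ht
          rw [List.length_take] at this
          simp only [List.length_nil] at this
          omega
        | cons hd tl => exact ⟨hd, tl, rfl⟩
      rw [hh, PySem.Chars.join_cons_cons]
      simp

theorem pvPfx_ends : ∀ (l : List (List Char)) (a : List Char),
    ∀ cs ∈ pvPfx a l, ∃ ds, cs = ds ++ ['_'] := by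
  intro l
  induction l with
  | nil => intro a; simp [pvPfx]
  | cons p rest ih =>
    intro a cs hcs
    rcases List.mem_cons.mp hcs with h | h
    · exact ⟨a ++ p, by simp [h]⟩
    · exact ih _ cs h

theorem pvPfx_len : ∀ (l : List (List Char)) (a : List Char),
    (pvPfx a l).Pairwise (fun x y => x.length < y.length) ∧
      ∀ cs ∈ pvPfx a l, a.length < cs.length := by
  intro l
  induction l with
  | nil => intro a; simp [pvPfx]
  | cons p rest ih =>
    intro a
    obtain ⟨ihp, ihl⟩ := ih (a ++ p ++ ['_'])
    refine ⟨List.pairwise_cons.mpr ⟨fun y hy => ?_, ihp⟩, ?_⟩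
    · have := ihl y hy; simp at this ⊢; omega
    · intro cs hcs
      rcases List.mem_cons.mp hcs with h | h
      · subst h; simp
      · have := ihl cs h; simp at this ⊢; omega

theorem pvPfx_prefix : ∀ (parts : List (List Char)),
    ∀ cs ∈ pvPfx [] parts.dropLast, cs <+: PySem.Chars.join ['_'] parts := by
  intro parts
  induction parts with
  | nil => simp [pvPfx]
  | cons p rest ih =>
    cases rest with
    | nil => simp [pvPfx]
    | cons q rs =>
      intro cs hcs
      rw [List.dropLast_cons₂] at hcs
      simp only [pvPfx, List.nil_append, List.mem_cons] at hcs
      rw [PySem.Chars.join_cons_cons]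
      rcases hcs with h | h
      · subst h
        exact ⟨PySem.Chars.join ['_'] (q :: rs), by simp⟩
      · rw [show p ++ ['_'] = (p ++ ['_']) ++ ([] : List Char) by simp, pvPfx_shift] at h
        obtain ⟨es, hes, hcse⟩ := List.mem_map.mp h
        obtain ⟨t, ht⟩ := ih es hes
        exact ⟨t, by simp [← hcse, ← ht]⟩

theorem pvPfx_complete : ∀ (parts : List (List Char)), (∀ p ∈ parts, '_' ∉ p) →
    ∀ ds : List Char, ds ++ ['_'] <+: PySem.Chars.join ['_'] parts →
      ds ++ ['_'] ∈ pvPfx [] parts.dropLast := by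
  intro parts
  induction parts with
  | nil =>
    intro _ ds h
    simp [PySem.Chars.join, List.intercalate] at h
  | cons p rest ih =>
    intro hns ds h
    cases rest with
    | nil =>
      exfalso
      have hj : PySem.Chars.join ['_'] [p] = p := by
        simp [PySem.Chars.join, List.intercalate]
      rw [hj] at h
      exact hns p (by simp) (h.sublist.mem (by simp))
    | cons q rs =>
      rw [PySem.Chars.join_cons_cons] at h
      rcases Nat.lt_trichotomy (ds ++ ['_']).length (p.length + 1) with hlt | heq | hgt
      · exfalso
        have hpre : ds ++ ['_'] <+: p := by
          have h2 : ds ++ ['_'] <+: p ++ ['_'] ++ PySem.Chars.join ['_'] (q :: rs) := by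
            simpa [List.append_assoc] using h
          have hp2 : p <+: p ++ ['_'] ++ PySem.Chars.join ['_'] (q :: rs) := by
            exact ⟨['_'] ++ PySem.Chars.join ['_'] (q :: rs), by simp⟩
          exact List.prefix_of_prefix_length_le h2 hp2 (by simp at hlt ⊢; omega)
        exact hns p (by simp) (hpre.sublist.mem (by simp))
      · have : ds ++ ['_'] = p ++ ['_'] := by
          have h2 : ds ++ ['_'] <+: p ++ ['_'] ++ PySem.Chars.join ['_'] (q :: rs) := by
            simpa [List.append_assoc] using h
          have hp2 : p ++ ['_'] <+: p ++ ['_'] ++ PySem.Chars.join ['_'] (q :: rs) :=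
            ⟨PySem.Chars.join ['_'] (q :: rs), by simp⟩
          have := List.prefix_of_prefix_length_le h2 hp2 (by simp at heq ⊢; omega)
          exact List.IsPrefix.eq_of_length this (by simp at heq ⊢; omega)
        rw [List.dropLast_cons₂]
        simp only [pvPfx, List.nil_append, List.mem_cons]
        exact Or.inl this
      · have hppre : p ++ ['_'] <+: ds := by
          have h2 : ds ++ ['_'] <+: p ++ ['_'] ++ PySem.Chars.join ['_'] (q :: rs) := by
            simpa [List.append_assoc] using h
          have hp2 : p ++ ['_'] <+: p ++ ['_'] ++ PySem.Chars.join ['_'] (q :: rs) :=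
            ⟨PySem.Chars.join ['_'] (q :: rs), by simp⟩
          have hpd : p ++ ['_'] <+: ds ++ ['_'] :=
            List.prefix_of_prefix_length_le hp2 h2 (by simp at hgt ⊢; omega)
          obtain ⟨t, ht⟩ := hpd
          cases t using List.reverseRecOn with
          | nil => exfalso; have := congrArg List.length ht; simp at this hgt; omega
          | append_singleton t' x =>
            refine ⟨t', ?_⟩
            have : (p ++ ['_'] ++ t') ++ [x] = ds ++ ['_'] := by simpa [List.append_assoc] using ht
            have h3 := List.append_inj' this (by rfl)
            exact h3.1
        obtain ⟨es, hes⟩ := hppre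
        have hesp : es ++ ['_'] <+: PySem.Chars.join ['_'] (q :: rs) := by
          have h2 : (p ++ ['_']) ++ (es ++ ['_']) <+: (p ++ ['_']) ++ PySem.Chars.join ['_'] (q :: rs) := by
            rw [← List.append_assoc, hes]
            simpa [List.append_assoc] using h
          exact (List.prefix_append_right_inj _).mp h2
        have hmem := ih (fun pp hpp => hns pp (by simp [hpp])) es hesp
        rw [List.dropLast_cons₂]
        simp only [pvPfx, List.nil_append, List.mem_cons]
        right
        rw [show p ++ ['_'] = (p ++ ['_']) ++ ([] : List Char) by simp, pvPfx_shift]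
        refine List.mem_map.mpr ⟨es ++ ['_'], hmem, ?_⟩
        rw [← hes]
        simp

-- the key's own strict underscore-prefixes, as strings
def pvKpsL (cs : List Char) : List (List Char) := pvPfx [] ((pvSplit '_' [] cs).dropLast)
def pvKps (k : String) : List String := (pvKpsL k.toList).map String.ofList

theorem pvKey_join (k : String) :
    PySem.Chars.join ['_'] (pvSplit '_' [] k.toList) = k.toList := by
  simpa using pvJoin_pvSplit '_' k.toList []

theorem pvKps_startswith (k : String) (p : String) (hp : p ∈ pvKps k) :
    PySem.Str.startswith k p = true := by
  unfold pvKps pvKpsL at hp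
  obtain ⟨cs, hcs, rfl⟩ := List.mem_map.mp hp
  rw [PySem.Str.startswith_eq, PySem.Chars.startswith_iff, String.toList_ofList]
  have h := pvPfx_prefix (pvSplit '_' [] k.toList) cs hcs
  rwa [pvKey_join] at h

theorem pvKps_ends (k p : String) (hp : p ∈ pvKps k) : ∃ ds, p.toList = ds ++ ['_'] := by
  unfold pvKps pvKpsL at hp
  obtain ⟨cs, hcs, rfl⟩ := List.mem_map.mp hp
  obtain ⟨ds, rfl⟩ := pvPfx_ends _ _ cs hcs
  exact ⟨ds, by rw [String.toList_ofList]⟩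

theorem pvKps_complete (k p : String) (hsw : PySem.Str.startswith k p = true)
    (hend : ∃ ds, p.toList = ds ++ ['_']) : p ∈ pvKps k := by
  obtain ⟨ds, hds⟩ := hend
  rw [PySem.Str.startswith_eq, PySem.Chars.startswith_iff, hds] at hsw
  have hns : ∀ q ∈ pvSplit '_' [] k.toList, '_' ∉ q := pvSplit_no_sep '_' k.toList [] (by simp)
  have hmem := pvPfx_complete _ hns ds (by rwa [pvKey_join])
  unfold pvKps pvKpsL
  refine List.mem_map.mpr ⟨ds ++ ['_'], hmem, ?_⟩
  rw [← hds, String.ofList_toList]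

theorem pvKps_len_pairwise (k : String) :
    (pvKps k).Pairwise (fun x y => PySem.Str.len x < PySem.Str.len y) := by
  unfold pvKps pvKpsL
  rw [List.pairwise_map]
  refine List.Pairwise.imp ?_ (pvPfx_len _ []).1
  intro x y hxy
  rw [PySem.Str.len_eq, PySem.Str.len_eq, String.toList_ofList, String.toList_ofList]
  exact_mod_cast hxy

-- the shared reference counter
def pvC (params : List (String × String)) : PySem.Dict String Int :=
  params.foldl (fun d kv => (pvKps kv.1).foldl (fun d p => d.modify p 0 (· + 1)) d)
    (PySem.Dict.empty : PySem.Dict String Int)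

theorem pvC_keys_aux (ps : List (String × String)) : ∀ (d : PySem.Dict String Int) (p : String),
    (p ∈ (ps.foldl (fun d kv => (pvKps kv.1).foldl (fun d q => d.modify q 0 (· + 1)) d) d).keys
      ↔ p ∈ d.keys ∨ ∃ kv ∈ ps, p ∈ pvKps kv.1) := by
  induction ps with
  | nil => intro d p; simp
  | cons kv t ih =>
    intro d p
    simp only [List.foldl_cons]
    rw [ih, PySem.Dict.keys_foldl_modify]
    simp only [PySem.Set.mem_update, List.mem_cons]
    constructor
    · rintro ((h | h) | ⟨kv2, h2, h3⟩)
      · exact Or.inl h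
      · exact Or.inr ⟨kv, Or.inl rfl, h⟩
      · exact Or.inr ⟨kv2, Or.inr h2, h3⟩
    · rintro (h | ⟨kv2, (h2 | h2), h3⟩)
      · exact Or.inl (Or.inl h)
      · exact Or.inl (Or.inr (h2 ▸ h3))
      · exact Or.inr ⟨kv2, h2, h3⟩

theorem pvC_keys_mem (params : List (String × String)) (p : String) :
    p ∈ (pvC params).keys ↔ ∃ kv ∈ params, p ∈ pvKps kv.1 := by
  unfold pvC
  rw [pvC_keys_aux]
  simp

theorem pvC_keys_nodup (params : List (String × String)) : (pvC params).keys.Nodup := by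
  unfold pvC
  generalize hd : (PySem.Dict.empty : PySem.Dict String Int) = d0
  have h0 : d0.keys.Nodup := by rw [← hd]; simp
  clear hd
  induction params generalizing d0 with
  | nil => simpa using h0
  | cons kv t ih =>
    simp only [List.foldl_cons]
    exact ih _ (PySem.Dict.nodup_keys_foldl_modify_key (pvKps kv.1) (fun x => x) 0
      (fun _ _ => (· + 1)) d0 h0)

theorem pvFindFirst {α : Type} (f : α → Int) (q : α → Bool) (p₀ : α) :
    ∀ L : List α, L.Pairwise (fun x y => f y ≤ f x) → p₀ ∈ L → q p₀ = true →
    (∀ p ∈ L, q p = true → f p ≤ f p₀ ∧ (f p = f p₀ → p = p₀)) →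
    L.find? q = some p₀ := by
  intro L
  induction L with
  | nil => intro _ h; simp at h
  | cons x t ih =>
    intro hpw hmem hq hbound
    obtain ⟨hx, ht⟩ := List.pairwise_cons.mp hpw
    by_cases hqx : q x = true
    · rw [List.find?_cons_of_pos hqx]
      obtain ⟨hle, heq⟩ := hbound x (by simp) hqx
      have hge : f p₀ ≤ f x := by
        rcases List.mem_cons.mp hmem with h | h
        · rw [h]
        · exact hx p₀ h
      rw [heq (le_antisymm hle hge)]
    · rw [List.find?_cons_of_neg (by simp [hqx])]
      have hp₀t : p₀ ∈ t := by
        rcases List.mem_cons.mp hmem with h | h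
        · exact absurd (by rw [← h]; exact hq) hqx
        · exact h
      exact ih ht hp₀t hq (fun p hp hqp => hbound p (by simp [hp]) hqp)

theorem pvFindMax {α : Type} (f : α → Int) (q : α → Bool) (a : α) :
    ∀ L : List α, L.Pairwise (fun x y => f y < f x) → L.find? q = some a →
    ∀ p ∈ L, q p = true → f p ≤ f a ∧ (f p = f a → p = a) := by
  intro L
  induction L with
  | nil => intro _ h; simp at h
  | cons x t ih =>
    intro hpw hfind p hp hqp
    obtain ⟨hx, ht⟩ := List.pairwise_cons.mp hpw
    by_cases hqx : q x = true
    · rw [List.find?_cons_of_pos hqx, Option.some.injEq] at hfind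
      subst hfind
      rcases List.mem_cons.mp hp with h | h
      · subst h; exact ⟨le_refl _, fun _ => rfl⟩
      · have hlt := hx p h
        exact ⟨le_of_lt hlt, fun he => absurd he (ne_of_lt hlt)⟩
    · rw [List.find?_cons_of_neg (by simp [hqx])] at hfind
      rcases List.mem_cons.mp hp with h | h
      · exact absurd (by rw [← h]; exact hqp) hqx
      · exact ih ht hfind p h hqp

theorem pvCountsA_eq (params : List (String × String)) :
    (params.foldl (fun d kv =>
      let parts := PySem.Chars.splitOn kv.1.toList ['_']
      (PySem.List.pyRange 1 (PySem.List.len parts) 1).foldl (fun d i =>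
        let pre := String.ofList (PySem.Chars.join ['_'] (PySem.List.slice parts none (some i)) ++ ['_'])
        d.modify pre 0 (· + 1)) d) (PySem.Dict.empty : PySem.Dict String Int)) = pvC params := by
  unfold pvC
  apply PySem.List.foldl_congr_mem
  intro d kv _
  dsimp only
  rw [pvSplitOn_eq]
  unfold pvKps pvKpsL
  generalize pvSplit '_' [] kv.1.toList = parts
  rw [PySem.List.len_eq, PySem.List.pyRange_one, List.foldl_map, List.foldl_map,
    pvPfx_take, List.foldl_map, List.length_dropLast,
    show (((parts.length : Int)) - 1).toNat = parts.length - 1 by omega]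
  apply PySem.List.foldl_congr_mem
  intro d2 j hj
  rw [List.mem_range] at hj
  have hkey : PySem.List.slice parts none (some (1 + (j : Int))) = parts.dropLast.take (j + 1) := by
    rw [PySem.List.slice_to parts (by omega), List.dropLast_eq_take, List.take_take]
    congr 1
    omega
  rw [hkey]
  simp

theorem pvAccCount (l : List (List Char)) : ∀ (a : List Char) (d : PySem.Dict String Int),
    (l.foldl (fun (st : List Char × PySem.Dict String Int) part =>
        (st.1 ++ part ++ ['_'], st.2.modify (String.ofList (st.1 ++ part ++ ['_'])) 0 (· + 1))) (a, d)).2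
      = (pvPfx a l).foldl (fun d p => d.modify (String.ofList p) 0 (· + 1)) d := by
  induction l with
  | nil => intro a d; simp [pvPfx]
  | cons p rest ih =>
    intro a d
    simp only [List.foldl_cons, pvPfx]
    exact ih _ _

theorem pvCountsB_eq (params : List (String × String)) :
    (params.foldl (fun d kv =>
      let parts := PySem.Chars.splitOn kv.1.toList ['_']
      ((PySem.List.slice parts none (some (-1))).foldl
        (fun (st : List Char × PySem.Dict String Int) part =>
          let acc := st.1 ++ part ++ ['_']
          (acc, st.2.modify (String.ofList acc) 0 (· + 1))) ([], d)).2)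
      (PySem.Dict.empty : PySem.Dict String Int)) = pvC params := by
  unfold pvC
  apply PySem.List.foldl_congr_mem
  intro d kv _
  dsimp only
  rw [pvSplitOn_eq, PySem.List.slice_to_neg_one, pvAccCount]
  unfold pvKps pvKpsL
  rw [List.foldl_map]

theorem pvAccList (l : List (List Char)) : ∀ (a : List Char) (ps : List String),
    (l.foldl (fun (st : List Char × List String) part =>
        (st.1 ++ part ++ ['_'], st.2 ++ [String.ofList (st.1 ++ part ++ ['_'])])) (a, ps)).2
      = ps ++ (pvPfx a l).map String.ofList := by
  induction l with
  | nil => intro a ps; simp [pvPfx]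
  | cons p rest ih =>
    intro a ps
    simp only [List.foldl_cons, pvPfx, List.map_cons]
    rw [ih]
    simp

theorem pvPrefixes_eq (k : String) :
    (((PySem.List.slice (PySem.Chars.splitOn k.toList ['_']) none (some (-1))).foldl
        (fun (st : List Char × List String) part =>
          let acc := st.1 ++ part ++ ['_']
          (acc, st.2 ++ [String.ofList acc])) ([], [])).2) = pvKps k := by
  rw [pvSplitOn_eq, PySem.List.slice_to_neg_one]
  dsimp only
  rw [pvAccList]
  unfold pvKps pvKpsL
  simp

theorem pvMain (params : List (String × String)) (min_shared_keys : Int) (k : String)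
    (hk : ∃ v, (k, v) ∈ params) :
    (PySem.List.sorted
        (PySem.Set.ofList (((pvC params).items.filter
          (fun pc => decide (min_shared_keys ≤ pc.2))).map (·.1)))
        (fun p => PySem.Str.len p) true).find? (fun pre => PySem.Str.startswith k pre)
      = (pvKps k).reverse.find? (fun p => decide (min_shared_keys ≤ (pvC params).getD p 0)) := by
  have hnd := pvC_keys_nodup params
  set V := PySem.Set.ofList (((pvC params).items.filter
      (fun pc => decide (min_shared_keys ≤ pc.2))).map (·.1)) with hVdef
  have hval : ∀ q : String, q ∈ V ↔
      (q ∈ (pvC params).keys ∧ min_shared_keys ≤ (pvC params).getD q 0) := by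
    intro q
    rw [hVdef, PySem.Set.mem_ofList]
    constructor
    · intro hq
      obtain ⟨pc, hpc, rfl⟩ := List.mem_map.mp hq
      obtain ⟨hpc1, hpc2⟩ := List.mem_filter.mp hpc
      have hg : (pvC params).get? pc.1 = some pc.2 := by
        rcases pc with ⟨q, c⟩
        exact (PySem.Dict.get?_eq_some_iff_mem_items _ _ _ hnd).mpr hpc1
      constructor
      · simp only [PySem.Dict.keys]
        exact List.mem_map.mpr ⟨pc, hpc1, rfl⟩
      · rw [PySem.Dict.getD_eq_get?_getD, hg]
        simpa using of_decide_eq_true hpc2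
    · rintro ⟨hqk, hqc⟩
      obtain ⟨c, hc⟩ : ∃ c, (pvC params).get? q = some c := by
        cases h : (pvC params).get? q with
        | none => exact absurd hqk ((PySem.Dict.get?_eq_none_iff_not_mem_keys _ _).mp h)
        | some c => exact ⟨c, rfl⟩
      have hitems := (PySem.Dict.get?_eq_some_iff_mem_items _ _ _ hnd).mp hc
      refine List.mem_map.mpr ⟨(q, c), List.mem_filter.mpr ⟨hitems, ?_⟩, rfl⟩
      rw [PySem.Dict.getD_eq_get?_getD, hc] at hqc
      simpa using hqc
  have hVk : ∀ q, q ∈ V → PySem.Str.startswith k q = true → q ∈ pvKps k := by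
    intro q hq hsw
    obtain ⟨hqk, _⟩ := (hval q).mp hq
    obtain ⟨kv, _, hq2⟩ := (pvC_keys_mem params q).mp hqk
    exact pvKps_complete k q hsw (pvKps_ends kv.1 q hq2)
  have hkV : ∀ q ∈ pvKps k, min_shared_keys ≤ (pvC params).getD q 0 → q ∈ V := by
    intro q hq hc
    obtain ⟨v, hv⟩ := hk
    exact (hval q).mpr ⟨(pvC_keys_mem params q).mpr ⟨(k, v), hv, hq⟩, hc⟩
  have hperm := PySem.List.sorted_perm V (fun p => PySem.Str.len p) true
  have hpw := PySem.List.sorted_pairwise_rev V (fun p => PySem.Str.len p)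
  cases hR : (pvKps k).reverse.find? (fun p => decide (min_shared_keys ≤ (pvC params).getD p 0)) with
  | none =>
    apply List.find?_eq_none.mpr
    intro q hq hsw
    have hqV : q ∈ V := hperm.mem_iff.mp hq
    have hqk := hVk q hqV hsw
    have hqc : min_shared_keys ≤ (pvC params).getD q 0 := ((hval q).mp hqV).2
    have hn := List.find?_eq_none.mp hR q (List.mem_reverse.mpr hqk)
    simp [hqc] at hn
  | some p₀ =>
    have hp₀mem : p₀ ∈ pvKps k := List.mem_reverse.mp (List.mem_of_find?_eq_some hR)
    have hp₀q : min_shared_keys ≤ (pvC params).getD p₀ 0 := by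
      have := List.find?_some hR
      simpa using this
    have hrevpw : ((pvKps k).reverse).Pairwise
        (fun x y => PySem.Str.len y < PySem.Str.len x) := by
      rw [List.pairwise_reverse]
      exact pvKps_len_pairwise k
    have hmax := pvFindMax (fun p => PySem.Str.len p) _ p₀ _ hrevpw hR
    refine pvFindFirst (fun p => PySem.Str.len p) _ p₀ _ hpw
      (hperm.mem_iff.mpr (hkV p₀ hp₀mem hp₀q)) (pvKps_startswith k p₀ hp₀mem) ?_
    intro p hp hq
    have hpV : p ∈ V := hperm.mem_iff.mp hp
    have hpk := hVk p hpV hq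
    have hpc : min_shared_keys ≤ (pvC params).getD p 0 := ((hval p).mp hpV).2
    exact hmax p (List.mem_reverse.mpr hpk) (by simpa using hpc)

-- ===== VERDICT (by name: the statement is the Claim_ definition above) =====
theorem group_params_spec : Claim_equal_group_params := by
  intro params min_shared_keys _
  unfold Spec_group_params group_params group_params_alt
  dsimp only
  rw [pvCountsA_eq, pvCountsB_eq]
  refine congrArg _ (congrArg _ ?_)
  apply PySem.List.foldl_congr_mem
  intro acc kv hkv
  dsimp only
  rw [pvPrefixes_eq, pvMain params min_shared_keys kv.1 ⟨kv.2, hkv⟩]
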